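-- pv_equiv track=rewrite | github.com/SanthaKumar-K-2004/SRE | tasks/task1.py | _partial_type_match
-- ===== SOURCE A (Python) =====
-- def _partial_type_match(predicted: str, gold: str) -> bool:
--     """
--     Check if the predicted type is in the same family as the gold type.
--     e.g., 'cpu_spike' and 'db_overload' are both resource issues.
--     """
--     resource_types = {"cpu_spike", "memory_leak", "db_overload"}
--     network_types = {"network_partition", "dependency_timeout"}
--     deploy_types = {"deployment_failure", "config_error"}
--
--     for family in (resource_types, network_types, deploy_types):
--         if predicted in family and gold in family:
--             return True
--     return False
-- ===== SOURCE B (Python) =====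
-- _SAME_FAMILY = frozenset(
--     (x, y)
--     for fam in (("cpu_spike", "memory_leak", "db_overload"),
--                 ("network_partition", "dependency_timeout"),
--                 ("deployment_failure", "config_error"))
--     for x in fam
--     for y in fam
-- )
--
--
-- def _partial_type_match(predicted: str, gold: str) -> bool:
--     return (predicted, gold) in _SAME_FAMILY
-- ===== Notes on version B (the rewrite author's own statement) =====
-- stated objective: alternative
-- what changed: Instead of classifying each string by looping over family sets with two membership tests, B precomputes the graph of the same-family relation as a frozenset of ordered pairs and answers with a single membership test on (predicted, gold).
import Mathlib
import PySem

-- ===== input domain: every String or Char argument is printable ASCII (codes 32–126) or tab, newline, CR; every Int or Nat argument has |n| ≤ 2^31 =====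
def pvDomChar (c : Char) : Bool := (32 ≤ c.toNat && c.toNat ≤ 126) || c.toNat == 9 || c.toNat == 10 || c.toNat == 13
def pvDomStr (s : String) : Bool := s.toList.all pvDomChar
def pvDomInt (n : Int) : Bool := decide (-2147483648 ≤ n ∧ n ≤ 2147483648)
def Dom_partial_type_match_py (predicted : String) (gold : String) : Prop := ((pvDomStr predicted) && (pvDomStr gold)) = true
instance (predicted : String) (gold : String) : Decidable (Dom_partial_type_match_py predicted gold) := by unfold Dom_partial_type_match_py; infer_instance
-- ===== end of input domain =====

-- B precomputes the same-family relation as a set of ordered pairs and does one membership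
-- test on (predicted, gold), replacing A's loop over family sets (alternative decomposition).

-- ===== PORT A =====
-- the 'for family in (…): if … return True' loop, as structural recursion over the family list
def pvLoopA : List (PySem.Set String) → String → String → Bool
  | [], _, _ => false
  | f :: rest, p, g =>
    if PySem.Set.contains f p && PySem.Set.contains f g then true else pvLoopA rest p g

def partial_type_match_py (predicted : String) (gold : String) : Bool :=
  let resource_types : PySem.Set String := PySem.Set.ofList ["cpu_spike", "memory_leak", "db_overload"]
  let network_types : PySem.Set String := PySem.Set.ofList ["network_partition", "dependency_timeout"]
  let deploy_types : PySem.Set String := PySem.Set.ofList ["deployment_failure", "config_error"]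
  pvLoopA [resource_types, network_types, deploy_types] predicted gold

-- ===== PORT B =====
-- Source B's module-level _SAME_FAMILY: the graph of the relation, built by the same comprehension
def pvSameFamily : PySem.Set (String × String) :=
  PySem.Set.ofList
    ([["cpu_spike", "memory_leak", "db_overload"],
      ["network_partition", "dependency_timeout"],
      ["deployment_failure", "config_error"]].flatMap
      (fun fam => fam.flatMap (fun x => fam.map (fun y => (x, y)))))

-- return (predicted, gold) in _SAME_FAMILY
def partial_type_match_py_alt (predicted : String) (gold : String) : Bool :=
  PySem.Set.contains pvSameFamily (predicted, gold)

-- ===== PRECONDITION & SPEC =====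
def Spec_partial_type_match_py (predicted : String) (gold : String) (out : Bool) : Prop := out = partial_type_match_py_alt predicted gold
instance (predicted : String) (gold : String) (out : Bool) : Decidable (Spec_partial_type_match_py predicted gold out) := by unfold Spec_partial_type_match_py; infer_instance

-- ===== CLAIM (what is proved, stated in full; the proofs are below) =====
def Claim_equal_partial_type_match_py : Prop := ∀ (predicted : String) (gold : String), Dom_partial_type_match_py predicted gold → Spec_partial_type_match_py predicted gold (partial_type_match_py predicted gold)

-- ===== LEMMAS AND PROOFS =====
-- exhaustive case split: each argument is one of the seven known type strings, or none of them
lemma pv_cases8 (s : String) :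
    s = "cpu_spike" ∨ s = "memory_leak" ∨ s = "db_overload" ∨
    s = "network_partition" ∨ s = "dependency_timeout" ∨
    s = "deployment_failure" ∨ s = "config_error" ∨
    (s ≠ "cpu_spike" ∧ s ≠ "memory_leak" ∧ s ≠ "db_overload" ∧
     s ≠ "network_partition" ∧ s ≠ "dependency_timeout" ∧
     s ≠ "deployment_failure" ∧ s ≠ "config_error") := by
  tauto

lemma ports_agree (p g : String) : partial_type_match_py p g = partial_type_match_py_alt p g := by
  rcases pv_cases8 p with hp | hp | hp | hp | hp | hp | hp | hp <;>
    rcases pv_cases8 g with hg | hg | hg | hg | hg | hg | hg | hg <;>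
    first
      | (subst hp; subst hg; decide)
      | (simp_all [partial_type_match_py, partial_type_match_py_alt, pvLoopA, pvSameFamily,
          PySem.Set.contains, PySem.Set.ofList, PySem.Set.add, Prod.ext_iff])

-- ===== VERDICT (by name: the statement is the Claim_ definition above) =====
theorem partial_type_match_py_spec : Claim_equal_partial_type_match_py := by
  intro p g _
  exact ports_agree p g
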